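-- pv_equiv track=rewrite | github.com/NuthanReddy/Nuthan | Problems/minFountains.py | min_cnt_foun
-- ===== SOURCE A (Python) =====
-- def min_cnt_foun(a, N):
--     # dp[i]: Stores the position of
--     # rightmost fountain that can
--     # be covered by water of leftmost
--     # fountain of the i-th fountain
--     dp = [-1] * N
--
--     # Traverse the array
--     for i in range(N):
--         idx_left = max(i - a[i], 0)
--         idx_right = min(i + (a[i] + 1), N)
--         dp[idx_left] = max(dp[idx_left], idx_right)
--
--     cnt_fount = 1
--     idx_right = dp[0]
--
--     # Stores index of next fountain
--     # that needed to be activated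
--     idx_next = 0
--
--     # Traverse dp[] array
--     for i in range(N):
--         idx_next = max(idx_next, dp[i])
--
--         # If left most fountain
--         # cover all its range
--         if i == idx_right:
--             cnt_fount += 1
--             idx_right = idx_next
--
--     return cnt_fount
-- ===== SOURCE B (Python) =====
-- def min_cnt_foun(a, N):
--     # Coverage intervals -> prefix-max reach array, then a jump chain
--     # instead of A's single left-to-right scan with trigger registers.
--     reach = [-1] * N
--     for i in range(N):
--         l = max(i - a[i], 0)
--         r = min(i + a[i] + 1, N)
--         if r > reach[l]:
--             reach[l] = r
--     # pm[j] = furthest right endpoint among intervals starting at or before j (floored at 0)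
--     pm = []
--     m = 0
--     for v in reach:
--         if v > m:
--             m = v
--         pm.append(m)
--     cnt = 1
--     last = -1
--     r = reach[0]
--     while last < r < N:
--         cnt += 1
--         last = r
--         r = pm[r]
--     return cnt
-- ===== Notes on version B (the rewrite author's own statement) =====
-- stated objective: alternative
-- what changed: A's second pass is a single left-to-right scan maintaining trigger registers (idx_right/idx_next); B instead materialises a prefix-max reach array and then follows a greedy jump chain (while last < r < N: r = pm[r]) over the covered positions, and B's interval pass overwrites conditionally instead of max-updating.
import Mathlib
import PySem

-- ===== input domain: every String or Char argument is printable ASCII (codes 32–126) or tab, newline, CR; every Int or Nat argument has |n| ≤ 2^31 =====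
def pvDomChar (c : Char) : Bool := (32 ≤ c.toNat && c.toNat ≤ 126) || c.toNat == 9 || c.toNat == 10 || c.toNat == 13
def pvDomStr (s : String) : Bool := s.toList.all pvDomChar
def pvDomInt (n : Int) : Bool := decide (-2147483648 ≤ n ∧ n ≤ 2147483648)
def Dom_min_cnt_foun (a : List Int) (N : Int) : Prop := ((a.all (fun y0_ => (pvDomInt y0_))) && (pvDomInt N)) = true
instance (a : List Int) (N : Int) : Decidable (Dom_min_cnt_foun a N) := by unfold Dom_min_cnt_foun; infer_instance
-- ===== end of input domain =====

-- B replaces A's single left-to-right trigger scan by a prefix-max array plus a greedy jump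
-- chain over the covered positions (objective: alternative decomposition, same cost).

-- ===== PORT A =====
def min_cnt_foun (a : List Int) (N : Int) : Int :=
  let dp : List Int := (PySem.List.pyRange 0 N 1).foldl (fun d i =>
      let ai := PySem.List.pyGetD a i 0
      let idxLeft := max (i - ai) 0
      let idxRight := min (i + (ai + 1)) N
      PySem.List.pySetD d idxLeft (max (PySem.List.pyGetD d idxLeft 0) idxRight))
    (List.replicate N.toNat (-1))
  let s := (PySem.List.pyRange 0 N 1).foldl (fun (st : Int × Int × Int) i =>
      let idxNext := max st.2.2 (PySem.List.pyGetD dp i 0)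
      if i == st.2.1 then (st.1 + 1, idxNext, idxNext) else (st.1, st.2.1, idxNext))
    (1, PySem.List.pyGetD dp 0 0, 0)
  s.1

-- ===== PORT B =====
-- the 'while last < r < N' jump chain of Source B; terminates because last strictly increases below N
def pvChain (pm : List Int) (N cnt last r : Int) : Int :=
  if h : last < r ∧ r < N then pvChain pm N (cnt + 1) r (PySem.List.pyGetD pm r 0) else cnt
termination_by (N - last).toNat
decreasing_by omega

def min_cnt_foun_alt (a : List Int) (N : Int) : Int :=
  let reach : List Int := (PySem.List.pyRange 0 N 1).foldl (fun d i =>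
      let ai := PySem.List.pyGetD a i 0
      let l := max (i - ai) 0
      let r := min (i + ai + 1) N
      if PySem.List.pyGetD d l 0 < r then PySem.List.pySetD d l r else d)
    (List.replicate N.toNat (-1))
  let pm : List Int := (reach.foldl (fun (st : Int × List Int) v =>
      let m := if st.1 < v then v else st.1
      (m, st.2 ++ [m])) ((0 : Int), ([] : List Int))).2
  pvChain pm N 1 (-1) (PySem.List.pyGetD reach 0 0)

-- ===== PRECONDITION & SPEC =====
-- Pre_ = exactly where the Python A returns: N ≥ 1 (dp[0] needs a nonempty dp), N ≤ len(a)
-- (a[i] is read for i < N), and every left index max(i-a[i],0) stays below N (dp[idx_left]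
-- raises IndexError otherwise, reachable with negative a[i]).
def Pre_min_cnt_foun (a : List Int) (N : Int) : Prop :=
  1 ≤ N ∧ N ≤ (a.length : Int) ∧ ∀ k : Nat, k < N.toNat → (k : Int) - a.getD k 0 < N
instance (a : List Int) (N : Int) : Decidable (Pre_min_cnt_foun a N) := by
  unfold Pre_min_cnt_foun; infer_instance

def pvWitness_min_cnt_foun : List Int × Int := ([1, 0, 2], 3)

def Spec_min_cnt_foun (a : List Int) (N : Int) (out : Int) : Prop := out = min_cnt_foun_alt a N
instance (a : List Int) (N : Int) (out : Int) : Decidable (Spec_min_cnt_foun a N out) := by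
  unfold Spec_min_cnt_foun; infer_instance

-- ===== CLAIM (what is proved, stated in full; the proofs are below) =====
def Claim_equal_min_cnt_foun : Prop := ∀ (a : List Int) (N : Int), Dom_min_cnt_foun a N → Pre_min_cnt_foun a N → Spec_min_cnt_foun a N (min_cnt_foun a N)

-- ===== LEMMAS AND PROOFS =====

-- prefix maximum of the first j entries of dp, floored at 0 ('idx_next' after scanning j entries)
def pvP (dp : List Int) (j : Nat) : Int := (dp.take j).foldl max 0

def pvMaxStep (dp : List Int) (m : Int) (k : Nat) : Int := max m (dp.getD k 0)

-- one step of A's second loop, over Nat indices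
def pvG (dp : List Int) (st : Int × Int × Int) (k : Nat) : Int × Int × Int :=
  let nx := max st.2.2 (dp.getD k 0)
  if (k : Int) == st.2.1 then (st.1 + 1, nx, nx) else (st.1, st.2.1, nx)

-- B's pm list, characterised
def pvPmL (dp : List Int) (n : Nat) : List Int := (List.range n).map (fun k => pvP dp (k + 1))

lemma pv_set_self (d : List Int) (i : Int) (hi : 0 ≤ i) :
    PySem.List.pySetD d i (PySem.List.pyGetD d i 0) = d := by
  rw [PySem.List.pySetD_of_nonneg _ _ hi, PySem.List.pyGetD_of_nonneg _ _ hi]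
  by_cases h : i.toNat < d.length
  · rw [List.getD_eq_getElem _ _ h]
    exact List.set_getElem_self h
  · exact List.set_eq_of_length_le (by omega)

-- A's first loop (max-update) and B's first loop (conditional overwrite) build the same list
lemma pv_dp_eq (a : List Int) (N : Int) :
    (PySem.List.pyRange 0 N 1).foldl (fun d i =>
      let ai := PySem.List.pyGetD a i 0
      let idxLeft := max (i - ai) 0
      let idxRight := min (i + (ai + 1)) N
      PySem.List.pySetD d idxLeft (max (PySem.List.pyGetD d idxLeft 0) idxRight))
      (List.replicate N.toNat (-1))
    = (PySem.List.pyRange 0 N 1).foldl (fun d i =>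
      let ai := PySem.List.pyGetD a i 0
      let l := max (i - ai) 0
      let r := min (i + ai + 1) N
      if PySem.List.pyGetD d l 0 < r then PySem.List.pySetD d l r else d)
      (List.replicate N.toNat (-1)) := by
  apply PySem.List.foldl_congr_mem'
  intro i _ d
  simp only []
  set ai := PySem.List.pyGetD a i 0 with hai
  have hassoc : i + (ai + 1) = i + ai + 1 := by ring
  rw [hassoc]
  set L := max (i - ai) 0 with hL
  set R := min (i + ai + 1) N with hR
  by_cases h : PySem.List.pyGetD d L 0 < R
  · rw [if_pos h, max_eq_right (le_of_lt h)]
  · rw [if_neg h]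
    rw [max_eq_left (by omega)]
    exact pv_set_self d L (by omega)

lemma pv_len_foldA (a : List Int) (N : Int) (l : List Int) (d : List Int) :
    (l.foldl (fun d i =>
      let ai := PySem.List.pyGetD a i 0
      let idxLeft := max (i - ai) 0
      let idxRight := min (i + (ai + 1)) N
      PySem.List.pySetD d idxLeft (max (PySem.List.pyGetD d idxLeft 0) idxRight)) d).length
    = d.length := by
  induction l generalizing d with
  | nil => rfl
  | cons x t ih => simp only [List.foldl_cons]; rw [ih]; exact PySem.List.length_pySetD _ _ _

-- B's pm loop produces the list of prefix maxima
lemma pv_pm_spec (l : List Int) : ∀ (m0 : Int) (acc : List Int),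
    (l.foldl (fun (st : Int × List Int) v =>
      let m := if st.1 < v then v else st.1
      (m, st.2 ++ [m])) (m0, acc)).2
    = acc ++ (List.range l.length).map (fun k => (l.take (k + 1)).foldl max m0) := by
  induction l with
  | nil => simp
  | cons v t ih =>
    intro m0 acc
    simp only [List.foldl_cons]
    rw [ih]
    have hmax : (if m0 < v then v else m0) = max m0 v := by omega
    rw [hmax]
    simp only [List.length_cons, List.range_succ_eq_map, List.map_cons, List.map_map]
    simp only [List.take, List.foldl_cons]
    rw [List.append_assoc]
    rfl

-- a trigger-free segment of A's scan only updates idx_next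
lemma pv_noTrig (dp : List Int) : ∀ (l : List Nat) (cnt r nx : Int),
    (∀ k ∈ l, (k : Int) ≠ r) →
    l.foldl (pvG dp) (cnt, r, nx) = (cnt, r, l.foldl (pvMaxStep dp) nx) := by
  intro l
  induction l with
  | nil => intro cnt r nx _; rfl
  | cons k t ih =>
    intro cnt r nx h
    simp only [List.foldl_cons]
    have hk : ((k : Int) == r) = false := by
      simp only [beq_eq_false_iff_ne]; exact h k (List.mem_cons_self)
    simp only [pvG, hk, if_false, Bool.false_eq_true]
    exact ih _ _ _ (fun x hx => h x (List.mem_cons_of_mem _ hx))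

lemma pv_P_succ (dp : List Int) (t : Nat) (ht : t < dp.length) :
    pvP dp (t + 1) = max (pvP dp t) (dp.getD t 0) := by
  unfold pvP
  rw [List.take_add_one, List.foldl_append]
  rw [List.getElem?_eq_getElem ht, List.getD_eq_getElem _ _ ht]
  rfl

lemma pv_max_seg (dp : List Int) : ∀ (delta i : Nat), i + delta ≤ dp.length →
    (List.range' i delta).foldl (pvMaxStep dp) (pvP dp i) = pvP dp (i + delta) := by
  intro delta
  induction delta with
  | zero => intro i _; rfl
  | succ d ih =>
    intro i h
    rw [List.range'_succ, List.foldl_cons]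
    have h1 : pvMaxStep dp (pvP dp i) i = pvP dp (i + 1) := by
      rw [pv_P_succ dp i (by omega)]; rfl
    rw [h1]
    have h2 := ih (i + 1) (by omega)
    rw [h2]
    ring_nf

-- MAIN: A's scan from index i (with idx_next = pvP dp i) equals B's jump chain with last = i-1
lemma pv_scan_chain (dp : List Int) (n : Nat) (hn : dp.length = n) :
    ∀ (m i : Nat) (cnt r : Int), i + m = n →
    ((List.range' i m).foldl (pvG dp) (cnt, r, pvP dp i)).1
      = pvChain (pvPmL dp n) (n : Int) cnt ((i : Int) - 1) r := by
  intro m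
  induction m using Nat.strong_induction_on with
  | _ m ih =>
  intro i cnt r him
  by_cases hc : (i : Int) ≤ r ∧ r < (n : Int)
  · obtain ⟨h1, h2⟩ := hc
    set t := r.toNat with htdef
    have hr0 : (0 : Int) ≤ r := le_trans (by positivity) h1
    have hrt : r = (t : Int) := (Int.toNat_of_nonneg hr0).symm
    have hit : i ≤ t := by omega
    have htn : t < n := by omega
    have hsplit : List.range' i m = List.range' i (t - i) ++ List.range' t (m - (t - i)) := by
      have h := List.range'_append_1 (s := i) (m := t - i) (n := m - (t - i))
      rw [show i + (t - i) = t by omega, show (t - i) + (m - (t - i)) = m by omega] at h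
      exact h.symm
    rw [hsplit, List.foldl_append]
    rw [pv_noTrig dp _ cnt r (pvP dp i) (by
      intro k hk
      rw [List.mem_range'_1] at hk
      omega)]
    rw [pv_max_seg dp _ _ (by omega), show i + (t - i) = t by omega]
    have hms : m - (t - i) = (m - (t - i) - 1) + 1 := by omega
    rw [hms, List.range'_succ, List.foldl_cons]
    have hstep : pvG dp (cnt, r, pvP dp t) t = (cnt + 1, pvP dp (t + 1), pvP dp (t + 1)) := by
      simp only [pvG, hrt]
      rw [if_pos (by simp)]
      rw [pv_P_succ dp t (by omega)]
    rw [hstep]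
    have hrec := ih (m - (t - i) - 1) (by omega) (t + 1) (cnt + 1) (pvP dp (t + 1)) (by omega)
    rw [hrec]
    conv_rhs => rw [pvChain]
    rw [dif_pos ⟨by omega, h2⟩]
    have hget : PySem.List.pyGetD (pvPmL dp n) r 0 = pvP dp (t + 1) := by
      rw [hrt, PySem.List.pyGetD_natCast]
      unfold pvPmL
      rw [PySem.List.getD_map_range _ _ _ _ htn]
    rw [hget]
    congr 1
    push_cast
    omega
  · rw [pv_noTrig dp _ cnt r (pvP dp i) (by
      intro k hk
      rw [List.mem_range'_1] at hk
      omega)]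
    conv_rhs => rw [pvChain]
    rw [dif_neg (by omega)]

lemma pv_range_cast (n : Nat) :
    PySem.List.pyRange 0 (n : Int) 1 = List.map (fun k : Nat => (k : Int)) (List.range n) := by
  rw [PySem.List.pyRange_one]
  simp

lemma pv_final (a : List Int) (N : Int) (hPre : 1 ≤ N) :
    min_cnt_foun a N = min_cnt_foun_alt a N := by
  obtain ⟨n, rfl⟩ : ∃ n : Nat, N = (n : Int) := ⟨N.toNat, by omega⟩
  simp only [min_cnt_foun, min_cnt_foun_alt]
  rw [pv_dp_eq]
  set reach : List Int := (PySem.List.pyRange 0 (n : Int) 1).foldl (fun d i =>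
      let ai := PySem.List.pyGetD a i 0
      let l := max (i - ai) 0
      let r := min (i + ai + 1) (n : Int)
      if PySem.List.pyGetD d l 0 < r then PySem.List.pySetD d l r else d)
      (List.replicate (n : Int).toNat (-1)) with hreach
  have hlen : reach.length = n := by
    rw [hreach, ← pv_dp_eq, pv_len_foldA, List.length_replicate, Int.toNat_natCast]
  have hpm : (reach.foldl (fun (st : Int × List Int) v =>
      let m := if st.1 < v then v else st.1
      (m, st.2 ++ [m])) ((0 : Int), ([] : List Int))).2 = pvPmL reach n := by
    rw [pv_pm_spec, hlen]
    rfl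
  rw [hpm, pv_range_cast, List.foldl_map]
  have hstep : (fun (x : Int × Int × Int) (y : Nat) =>
      if (((y : Nat) : Int) == x.2.1) = true then
        (x.1 + 1, max x.2.2 (PySem.List.pyGetD reach ((y : Nat) : Int) 0),
          max x.2.2 (PySem.List.pyGetD reach ((y : Nat) : Int) 0))
      else (x.1, x.2.1, max x.2.2 (PySem.List.pyGetD reach ((y : Nat) : Int) 0)))
      = pvG reach := by
    funext st k
    simp only [pvG, PySem.List.pyGetD_natCast]
  rw [hstep, List.range_eq_range']
  have hmain := pv_scan_chain reach n hlen n 0 1 (PySem.List.pyGetD reach 0 0) (by omega)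
  have h01 : (((0 : Nat) : Int) - 1) = -1 := by norm_num
  rw [h01] at hmain
  exact hmain

-- ===== VERDICT (by name: the statement is the Claim_ definition above) =====
theorem min_cnt_foun_spec : Claim_equal_min_cnt_foun := by
  intro a N _ hPre
  unfold Spec_min_cnt_foun
  exact pv_final a N hPre.1
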